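-- pv_equiv track=rewrite | github.com/KIRALTR232329/pts_v2.0.0 | edit_mode.py | saat_ciftlerine_ayir
-- ===== SOURCE A (Python) =====
-- def saat_ciftlerine_ayir(saat_listesi):
--     saat_listesi.sort()
--     ciftler = []
--     for i in range(0, len(saat_listesi), 2):
--         giris = saat_listesi[i]
--         cikis = saat_listesi[i + 1] if i + 1 < len(saat_listesi) else None
--         ciftler.append((giris, cikis))
--     return ciftler
-- ===== SOURCE B (Python) =====
-- def saat_ciftlerine_ayir(saat_listesi):
--     saat_listesi.sort()
--     ciftler = []
--     bekleyen = None
--     for saat in saat_listesi: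
--         if bekleyen is None:
--             bekleyen = saat
--         else:
--             ciftler.append((bekleyen, saat))
--             bekleyen = None
--     if bekleyen is not None:
--         ciftler.append((bekleyen, None))
--     return ciftler
-- ===== Notes on version B (the rewrite author's own statement) =====
-- stated objective: simpler
-- what changed: Replaces A's stride-2 index loop with per-step bounds checks by a single element-wise pass holding a pending entry, pairing each element with the held one; no index arithmetic at all.
import Mathlib
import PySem

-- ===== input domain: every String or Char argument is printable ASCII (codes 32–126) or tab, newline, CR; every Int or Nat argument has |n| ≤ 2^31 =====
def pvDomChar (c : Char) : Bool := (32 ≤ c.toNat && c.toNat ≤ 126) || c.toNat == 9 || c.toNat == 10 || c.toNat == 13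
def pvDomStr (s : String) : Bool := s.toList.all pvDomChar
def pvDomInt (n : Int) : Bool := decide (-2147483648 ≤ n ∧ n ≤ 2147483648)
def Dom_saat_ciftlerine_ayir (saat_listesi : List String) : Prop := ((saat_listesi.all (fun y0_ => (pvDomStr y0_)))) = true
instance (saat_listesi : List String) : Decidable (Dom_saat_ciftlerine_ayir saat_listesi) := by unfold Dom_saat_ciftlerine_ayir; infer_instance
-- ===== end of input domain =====

-- B replaces A's stride-2 index loop by a single element-wise pass with a pending-entry
-- accumulator (objective: simpler). Both Pythons sort the argument in place; the
-- equivalence proved here is about the RETURN value.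

-- ===== PORT A =====
-- A: sort, then for i in range(0, len, 2): pair s[i] with s[i+1] if in range else None.
def saat_ciftlerine_ayir (saat_listesi : List String) : List (String × Option String) :=
  let s := PySem.List.sorted saat_listesi (fun x => x) false
  (PySem.List.pyRange 0 (s.length : Int) 2).foldl
    (fun ciftler i =>
      let giris := PySem.List.pyGetD s i ""
      let cikis : Option String :=
        if i + 1 < (s.length : Int) then some (PySem.List.pyGetD s (i + 1) "") else none
      ciftler ++ [(giris, cikis)]) []

-- ===== PORT B =====
-- B: sort, then one pass holding a pending entry; flush the leftover entry with None.
def saat_ciftlerine_ayir_alt (saat_listesi : List String) : List (String × Option String) :=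
  let s := PySem.List.sorted saat_listesi (fun x => x) false
  let st := s.foldl
    (fun (acc : List (String × Option String) × Option String) saat =>
      match acc.2 with
      | none => (acc.1, some saat)
      | some bekleyen => (acc.1 ++ [(bekleyen, some saat)], none))
    ([], none)
  match st.2 with
  | none => st.1
  | some bekleyen => st.1 ++ [(bekleyen, none)]

-- ===== PRECONDITION & SPEC =====
def Spec_saat_ciftlerine_ayir (saat_listesi : List String) (out : List (String × Option String)) : Prop := out = saat_ciftlerine_ayir_alt saat_listesi
instance (saat_listesi : List String) (out : List (String × Option String)) : Decidable (Spec_saat_ciftlerine_ayir saat_listesi out) := by unfold Spec_saat_ciftlerine_ayir; infer_instance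

-- ===== CLAIM (what is proved, stated in full; the proofs are below) =====
def Claim_equal_saat_ciftlerine_ayir : Prop := ∀ (saat_listesi : List String), Dom_saat_ciftlerine_ayir saat_listesi → Spec_saat_ciftlerine_ayir saat_listesi (saat_ciftlerine_ayir saat_listesi)

-- ===== LEMMAS AND PROOFS =====

-- Common reference shape: pair up consecutive elements, odd tail gets none.
def pvPairUp : List String → List (String × Option String)
  | [] => []
  | [a] => [(a, none)]
  | a :: b :: t => (a, some b) :: pvPairUp t

theorem pvPyRange_two_nil (a b : Int) (h : b ≤ a) : PySem.List.pyRange a b 2 = [] := by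
  rw [PySem.List.pyRange_of_pos a b (by norm_num)]
  simp [if_neg (not_lt.mpr h)]

theorem pvPyRange_two_cons (a b : Int) (h : a < b) :
    PySem.List.pyRange a b 2 = a :: PySem.List.pyRange (a + 2) b 2 := by
  rw [PySem.List.pyRange_of_pos a b (by norm_num),
      PySem.List.pyRange_of_pos (a + 2) b (by norm_num)]
  rw [if_pos h]
  by_cases h2 : a + 2 < b
  · rw [if_pos h2]
    have hn : ((b - a + 2 - 1) / 2).toNat = ((b - (a + 2) + 2 - 1) / 2).toNat + 1 := by
      omega
    rw [hn, List.range_succ_eq_map]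
    simp only [List.map_cons, List.map_map]
    congr 1
    · push_cast; ring
    · apply List.map_congr_left
      intro k _
      simp only [Function.comp_apply]
      push_cast
      ring
  · rw [if_neg h2]
    have hn : ((b - a + 2 - 1) / 2).toNat = 1 := by omega
    rw [hn]
    simp

theorem pvGetD_drop {f : List String} {k : Nat} {a : String} {t : List String}
    (h : f.drop k = a :: t) : PySem.List.pyGetD f (k : Int) "" = a := by
  have hk : k < f.length := by
    by_contra hc
    rw [List.drop_eq_nil_of_le (by omega)] at h
    exact absurd h (by simp)
  have h0 : f[k]? = some a := by
    rw [show k = k + 0 by omega, ← List.getElem?_drop, h]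
    rfl
  rw [PySem.List.pyGetD_natCast]
  simp [List.getD, h0]

theorem pvLenDrop {f : List String} {k : Nat} {t : List String}
    (h : f.drop k = t) : f.length = k + t.length ∨ f.length ≤ k := by
  by_cases hk : k ≤ f.length
  · left
    have hl : (f.drop k).length = f.length - k := by simp
    rw [h] at hl; omega
  · right; omega

-- A's loop over pyRange k len 2, reading the suffix f.drop k, produces pvPairUp of that suffix.
theorem pvLoopA (t : List String) : ∀ (f : List String) (k : Nat)
    (hk : f.drop k = t) (acc : List (String × Option String)),
    (PySem.List.pyRange (k : Int) (f.length : Int) 2).foldl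
      (fun ciftler i =>
        ciftler ++ [(PySem.List.pyGetD f i "",
          if i + 1 < (f.length : Int) then some (PySem.List.pyGetD f (i + 1) "") else none)]) acc
    = acc ++ pvPairUp t := by
  induction t using pvPairUp.induct with
  | case1 =>
    intro f k hk acc
    have hle : f.length ≤ k := by
      rcases pvLenDrop hk with h | h
      · simp only [List.length_nil] at h; omega
      · exact h
    rw [pvPyRange_two_nil _ _ (by exact_mod_cast hle)]
    simp [pvPairUp]
  | case2 a =>
    intro f k hk acc
    rcases pvLenDrop hk with h | h
    · simp only [List.length_cons, List.length_nil] at h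
      rw [pvPyRange_two_cons _ _ (by exact_mod_cast (by omega : k < f.length))]
      rw [pvPyRange_two_nil _ _ (by push_cast; omega)]
      simp only [List.foldl_cons, List.foldl_nil]
      rw [pvGetD_drop hk]
      rw [if_neg (by push_cast; omega)]
      simp [pvPairUp]
    · rw [List.drop_eq_nil_of_le h] at hk; exact absurd hk (by simp)
  | case3 a b r ih =>
    intro f k hk acc
    rcases pvLenDrop hk with h | h
    · simp only [List.length_cons] at h
      have hdrop1 : f.drop (k + 1) = b :: r := by
        have hd : (f.drop k).drop 1 = f.drop (k + 1) := by
          rw [List.drop_drop]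
        rw [← hd, hk]; rfl
      have hdrop2 : f.drop (k + 2) = r := by
        have hd : (f.drop k).drop 2 = f.drop (k + 2) := by
          rw [List.drop_drop]
        rw [← hd, hk]; rfl
      rw [pvPyRange_two_cons _ _ (by push_cast; omega)]
      simp only [List.foldl_cons]
      rw [pvGetD_drop hk]
      rw [if_pos (by push_cast; omega)]
      have hb : PySem.List.pyGetD f ((k : Int) + 1) "" = b := by
        have := pvGetD_drop hdrop1
        push_cast at this ⊢
        exact this
      rw [hb]
      have : ((k : Int) + 2) = ((k + 2 : Nat) : Int) := by push_cast; ring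
      rw [this, ih f (k + 2) hdrop2]
      simp [pvPairUp]
    · rw [List.drop_eq_nil_of_le h] at hk; exact absurd hk (by simp)

-- B's single pass with a pending entry also produces pvPairUp.
theorem pvLoopB (t : List String) : ∀ (acc : List (String × Option String)),
    (match (t.foldl
      (fun (st : List (String × Option String) × Option String) saat =>
        match st.2 with
        | none => (st.1, some saat)
        | some bekleyen => (st.1 ++ [(bekleyen, some saat)], none))
      (acc, none)).2 with
    | none => (t.foldl
      (fun (st : List (String × Option String) × Option String) saat =>
        match st.2 with
        | none => (st.1, some saat)
        | some bekleyen => (st.1 ++ [(bekleyen, some saat)], none))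
      (acc, none)).1
    | some bekleyen => (t.foldl
      (fun (st : List (String × Option String) × Option String) saat =>
        match st.2 with
        | none => (st.1, some saat)
        | some bekleyen => (st.1 ++ [(bekleyen, some saat)], none))
      (acc, none)).1 ++ [(bekleyen, none)])
    = acc ++ pvPairUp t := by
  induction t using pvPairUp.induct with
  | case1 => intro acc; simp [pvPairUp]
  | case2 a => intro acc; simp [pvPairUp]
  | case3 a b r ih =>
    intro acc
    have h1 := ih (acc ++ [(a, some b)])
    calc _ = (acc ++ [(a, some b)]) ++ pvPairUp r := h1
    _ = acc ++ pvPairUp (a :: b :: r) := by simp [pvPairUp]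

-- ===== VERDICT (by name: the statement is the Claim_ definition above) =====
theorem saat_ciftlerine_ayir_spec : Claim_equal_saat_ciftlerine_ayir := by
  intro saat_listesi _
  unfold Spec_saat_ciftlerine_ayir saat_ciftlerine_ayir saat_ciftlerine_ayir_alt
  set s := PySem.List.sorted saat_listesi (fun x => x) false with hs
  have hA := pvLoopA s s 0 (by simp) []
  have hB := pvLoopB s []
  simp only [Nat.cast_zero] at hA
  rw [hA, ← hB]
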